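-- pv_equiv track=rewrite | github.com/SmartHomePrivacyProject/VCFingerprinting | vcfp_attack/trainByVNGpp.py | calculateBursts
-- ===== SOURCE A (Python) =====
-- def calculateBursts(tupleList):
--     tuple_length = len(tupleList)
--     for i in range(tuple_length):
--         item = tupleList[i]
--         if 0 == i:
--             direction = item[-1]
--             burstList = []
--             tmp_burst = item[0] * item[1]
--             continue
--
--         tmp_direc = item[-1]
--         if direction != tmp_direc:
--             burstList.append(tmp_burst)
--             direction = tmp_direc
--             tmp_burst = (item[0] * item[1])
--         else:
--             tmp_burst += (item[0] * item[1])
--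
--     burstList.append(tmp_burst)
--
--     return burstList
-- ===== SOURCE B (Python) =====
-- def calculateBursts(tupleList):
--     if not tupleList:
--         return []
--     out = []
--     prev = None
--     for item in reversed(tupleList):
--         p = item[0] * item[1]
--         if prev is not None and item[-1] == prev:
--             out[0] = p + out[0]
--         else:
--             out.insert(0, p)
--         prev = item[-1]
--     return out
-- ===== Notes on version B (the rewrite author's own statement) =====
-- stated objective: alternative
-- what changed: B builds the burst list back-to-front in one reversed pass, merging each product into the front burst when the direction matches the following item, instead of A's forward loop with a first-iteration bootstrap, a direction-change flush and a trailing append.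
import Mathlib
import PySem

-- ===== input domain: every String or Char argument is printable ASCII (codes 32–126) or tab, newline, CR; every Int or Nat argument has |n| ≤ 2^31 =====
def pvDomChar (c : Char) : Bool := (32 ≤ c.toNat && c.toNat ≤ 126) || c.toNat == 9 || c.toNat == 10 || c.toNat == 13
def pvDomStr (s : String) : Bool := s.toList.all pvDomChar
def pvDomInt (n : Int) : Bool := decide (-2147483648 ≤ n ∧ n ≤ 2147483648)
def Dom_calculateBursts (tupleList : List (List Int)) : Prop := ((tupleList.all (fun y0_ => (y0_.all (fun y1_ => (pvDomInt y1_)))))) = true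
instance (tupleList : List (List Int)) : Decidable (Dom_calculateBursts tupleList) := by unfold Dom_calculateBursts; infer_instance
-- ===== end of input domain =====

-- B builds the burst list back-to-front in one reversed pass (merge-at-front), instead of
-- A's forward loop with bootstrap, direction-change flush and trailing append (objective: alternative).


-- ===== PORT A =====
-- state = none before the first iteration (direction/burstList/tmp_burst unbound), then
-- some (direction, burstList, tmp_burst); item accesses via pyGet? (raising cases are outside Pre_)
def pvA_step (st : Option (Int × List Int × Int)) (item : List Int) : Option (Int × List Int × Int) :=
  match st with
  | none =>
      some ((PySem.List.pyGet? item (-1)).getD 0, [],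
        ((PySem.List.pyGet? item 0).getD 0) * ((PySem.List.pyGet? item 1).getD 0))
  | some (direction, burstList, tmpBurst) =>
      let tmpDirec := (PySem.List.pyGet? item (-1)).getD 0
      if direction ≠ tmpDirec then
        some (tmpDirec, burstList ++ [tmpBurst],
          ((PySem.List.pyGet? item 0).getD 0) * ((PySem.List.pyGet? item 1).getD 0))
      else
        some (direction, burstList,
          tmpBurst + ((PySem.List.pyGet? item 0).getD 0) * ((PySem.List.pyGet? item 1).getD 0))

def pvA_finish (st : Option (Int × List Int × Int)) : List Int :=
  match st with
  | none => []  -- Python raises NameError here (empty input); excluded by Pre_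
  | some (_, burstList, tmpBurst) => burstList ++ [tmpBurst]

def calculateBursts (tupleList : List (List Int)) : List Int :=
  pvA_finish (tupleList.foldl pvA_step none)

-- ===== PORT B =====
def pvB_prod (item : List Int) : Int :=
  ((PySem.List.pyGet? item 0).getD 0) * ((PySem.List.pyGet? item 1).getD 0)

def pvB_dir (item : List Int) : Int :=
  (PySem.List.pyGet? item (-1)).getD 0

-- state = (out, prev); prev = none only before the first reversed item; out[0] = headI
-- (out is nonempty whenever prev ≠ none, so headI is exact for Python's out[0])
def pvB_step (st : List Int × Option Int) (item : List Int) : List Int × Option Int :=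
  let p := pvB_prod item
  match st with
  | (out, some prev) =>
      if pvB_dir item = prev then ((p + out.headI) :: out.tail, some (pvB_dir item))
      else (p :: out, some (pvB_dir item))
  | (out, none) => (p :: out, some (pvB_dir item))

def calculateBursts_alt (tupleList : List (List Int)) : List Int :=
  if tupleList = [] then []
  else (tupleList.reverse.foldl pvB_step ([], none)).1

-- ===== PRECONDITION & SPEC =====
-- Pre_ is exactly where A returns: a nonempty list (else NameError) of items of length ≥ 2
-- (item[1] / item[-1] raise IndexError on shorter items).
def Pre_calculateBursts (tupleList : List (List Int)) : Prop :=
  tupleList ≠ [] ∧ ∀ item ∈ tupleList, 2 ≤ item.length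
instance (tupleList : List (List Int)) : Decidable (Pre_calculateBursts tupleList) := by
  unfold Pre_calculateBursts; infer_instance

def pvWitness_calculateBursts : List (List Int) := [[1, 2, 1], [3, 4, -1], [2, 2, -1]]

def Spec_calculateBursts (tupleList : List (List Int)) (out : List Int) : Prop := out = calculateBursts_alt tupleList
instance (tupleList : List (List Int)) (out : List Int) : Decidable (Spec_calculateBursts tupleList out) := by unfold Spec_calculateBursts; infer_instance

-- ===== CLAIM (what is proved, stated in full; the proofs are below) =====
def Claim_equal_calculateBursts : Prop := ∀ (tupleList : List (List Int)), Dom_calculateBursts tupleList → Pre_calculateBursts tupleList → Spec_calculateBursts tupleList (calculateBursts tupleList)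

-- ===== LEMMAS AND PROOFS =====

-- the natural structural recursion both ports compute
def pvRec : List (List Int) → List Int
  | [] => []
  | [item] => [pvB_prod item]
  | item :: r :: rs =>
      let sub := pvRec (r :: rs)
      if pvB_dir item = pvB_dir r then (pvB_prod item + sub.headI) :: sub.tail
      else pvB_prod item :: sub

-- what A's loop produces from state (dir, ·, tb) when the remaining items are `rest`
def pvG (dir tb : Int) : List (List Int) → List Int
  | [] => [tb]
  | r :: rs =>
      if dir = pvB_dir r then (tb + (pvRec (r :: rs)).headI) :: (pvRec (r :: rs)).tail
      else tb :: pvRec (r :: rs)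

theorem pvRec_cons (item : List Int) (rest : List (List Int)) :
    pvRec (item :: rest) = pvG (pvB_dir item) (pvB_prod item) rest := by
  cases rest with
  | nil => simp [pvRec, pvG]
  | cons r rs => simp [pvRec, pvG]

theorem pvG_shift (rest : List (List Int)) (dir tb p : Int) :
    pvG dir (tb + p) rest = (tb + (pvG dir p rest).headI) :: (pvG dir p rest).tail := by
  cases rest with
  | nil => simp [pvG]
  | cons r rs =>
      by_cases h : dir = pvB_dir r <;> simp [pvG, h, add_assoc]

theorem pvA_loop (rest : List (List Int)) : ∀ (dir tb : Int) (bl : List Int),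
    pvA_finish (rest.foldl pvA_step (some (dir, bl, tb))) = bl ++ pvG dir tb rest := by
  induction rest with
  | nil => intro dir tb bl; simp [pvA_finish, pvG]
  | cons r rs ih =>
      intro dir tb bl
      have hd : (PySem.List.pyGet? r (-1)).getD 0 = pvB_dir r := rfl
      have hp : ((PySem.List.pyGet? r 0).getD 0) * ((PySem.List.pyGet? r 1).getD 0) = pvB_prod r := rfl
      by_cases h : dir = pvB_dir r
      · have hstep : pvA_step (some (dir, bl, tb)) r = some (dir, bl, tb + pvB_prod r) := by
          simp [pvA_step, hd, hp, h]
        rw [List.foldl_cons, hstep, ih, pvG]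
        simp [h, pvRec_cons r rs, pvG_shift]
      · have hstep : pvA_step (some (dir, bl, tb)) r
            = some (pvB_dir r, bl ++ [tb], pvB_prod r) := by
          simp [pvA_step, hd, hp, h]
        rw [List.foldl_cons, hstep, ih, pvG]
        simp [h, pvRec_cons r rs]

theorem pvA_eq_pvRec (item : List Int) (rest : List (List Int)) :
    calculateBursts (item :: rest) = pvRec (item :: rest) := by
  have h0 : pvA_step none item = some (pvB_dir item, [], pvB_prod item) := by
    simp [pvA_step, pvB_dir, pvB_prod]
  unfold calculateBursts
  rw [List.foldl_cons, h0, pvA_loop, pvRec_cons]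
  simp

theorem pvB_foldr (item : List Int) (rest : List (List Int)) :
    List.foldr (fun x st => pvB_step st x) ([], none) (item :: rest)
      = (pvRec (item :: rest), some (pvB_dir item)) := by
  induction rest generalizing item with
  | nil => simp [pvB_step, pvRec]
  | cons r rs ih =>
      rw [List.foldr_cons, ih r]
      by_cases h : pvB_dir item = pvB_dir r <;>
        simp [pvB_step, pvRec, h]

theorem pvB_eq_pvRec (item : List Int) (rest : List (List Int)) :
    calculateBursts_alt (item :: rest) = pvRec (item :: rest) := by
  unfold calculateBursts_alt
  rw [if_neg (by simp), List.foldl_reverse, pvB_foldr]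

-- ===== VERDICT (by name: the statement is the Claim_ definition above) =====
theorem calculateBursts_spec : Claim_equal_calculateBursts := by
  intro tupleList _ hpre
  cases tupleList with
  | nil => exact absurd rfl hpre.1
  | cons item rest =>
      unfold Spec_calculateBursts
      rw [pvA_eq_pvRec, pvB_eq_pvRec]
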